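-- pv_equiv track=rewrite | github.com/Monadical-SAS/oddslingers.poker | core/oddslingers/middleware/http2_middleware.py | create_preload_header
-- ===== SOURCE A (Python) =====
-- PRELOAD_AS = {
--     'js': 'script',
--     'css': 'style',
--     'png': 'image',
--     'jpg': 'image',
--     'jpeg': 'image',
--     'webp': 'image',
--     'svg': 'image',
--     'gif': 'image',
--     'ttf': 'font',
--     'woff': 'font',
--     'woff2': 'font'
-- }
--
-- PRELOAD_ORDER = {
--     'css': 0,
--     'ttf': 1,
--     'woff': 1,
--     'woff2': 1,
--     'js': 2,
-- }
--
-- def create_preload_header(urls):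
--     """Compose the Link: header contents from a list of urls"""
--     without_vers = lambda url: url.split('?', 1)[0]
--     extension = lambda  url: url.rsplit('.', 1)[-1].lower()
--     preload_priority = lambda url: PRELOAD_ORDER.get(url[1], 100)
--
--     urls_with_ext = ((url, extension(without_vers(url))) for url in urls)
--     sorted_urls = sorted(urls_with_ext, key=preload_priority)
--
--     preload_tags = (
--         f'<{url}>; rel=preload; crossorigin; as={PRELOAD_AS[ext]}'
--         if ext in PRELOAD_AS else
--         f'<{url}>; rel=preload; crossorigin'
--         for url, ext in sorted_urls
--     )
--     return ', '.join(preload_tags)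
-- ===== SOURCE B (Python) =====
-- PRELOAD_AS = {
--     'js': 'script',
--     'css': 'style',
--     'png': 'image',
--     'jpg': 'image',
--     'jpeg': 'image',
--     'webp': 'image',
--     'svg': 'image',
--     'gif': 'image',
--     'ttf': 'font',
--     'woff': 'font',
--     'woff2': 'font'
-- }
--
-- def create_preload_header(urls):
--     """Compose the Link: header contents from a list of urls.
--
--     Two staged passes instead of a comparison sort: one pass tags each url and
--     computes its priority (only 0, 1, 2 or 100 can occur), then the tags are
--     emitted bucket by bucket in increasing priority order.  Stable by
--     construction, so it reproduces Python's stable sorted().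
--     """
--     pairs = []
--     for url in urls:
--         base = url.partition('?')[0]
--         i = base.rfind('.')
--         ext = (base[i + 1:] if i >= 0 else base).lower()
--         if ext == 'css':
--             pr = 0
--         elif ext in ('ttf', 'woff', 'woff2'):
--             pr = 1
--         elif ext == 'js':
--             pr = 2
--         else:
--             pr = 100
--         tag = '<%s>; rel=preload; crossorigin' % url
--         kind = PRELOAD_AS.get(ext)
--         if kind is not None:
--             tag += '; as=' + kind
--         pairs.append((pr, tag))
--     out = []
--     for want in (0, 1, 2, 100):
--         out.extend(tag for pr, tag in pairs if pr == want)
--     return ', '.join(out)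
-- ===== Notes on version B (the rewrite author's own statement) =====
-- stated objective: alternative
-- what changed: Replaces sorted() with a priority key by two staged passes: one pass computes each url's tag and priority (only 0, 1, 2 or 100 can occur), a second pass emits the tags bucket by bucket in increasing priority order, which is stable by construction; asymptotically O(n) but not measurably faster than C-implemented sorted().
import Mathlib
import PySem

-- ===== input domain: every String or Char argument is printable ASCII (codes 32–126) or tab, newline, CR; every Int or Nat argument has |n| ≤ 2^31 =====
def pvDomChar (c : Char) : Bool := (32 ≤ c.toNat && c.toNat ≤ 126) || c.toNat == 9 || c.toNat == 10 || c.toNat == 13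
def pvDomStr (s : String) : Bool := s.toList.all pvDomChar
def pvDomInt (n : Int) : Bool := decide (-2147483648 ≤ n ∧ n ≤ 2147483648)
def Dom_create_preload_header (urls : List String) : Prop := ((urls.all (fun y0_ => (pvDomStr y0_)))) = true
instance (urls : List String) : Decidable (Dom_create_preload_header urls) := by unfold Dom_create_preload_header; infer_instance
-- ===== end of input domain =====

-- B replaces A's comparison sort by two staged passes: one tagging pass and one
-- bucket-emission pass over the four possible priority values (0, 1, 2, 100).

-- ===== PORT A =====
def PRELOAD_AS_ : PySem.Dict String String :=
  PySem.Dict.mk [("js","script"),("css","style"),("png","image"),("jpg","image"),("jpeg","image"),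
                 ("webp","image"),("svg","image"),("gif","image"),("ttf","font"),("woff","font"),("woff2","font")]

def PRELOAD_ORDER_ : PySem.Dict String Int :=
  PySem.Dict.mk [("css",0),("ttf",1),("woff",1),("woff2",1),("js",2)]

-- url.split('?', 1)[0]: exact — the prefix before the first '?' (the whole string if none)
def pvWithoutVers (cs : List Char) : List Char := cs.takeWhile (fun c => c ≠ '?')

-- s.rsplit('.', 1)[-1]: exact — the characters after the LAST '.', none if there is no '.'
def pvTailAfterDot : List Char → Option (List Char)
  | [] => none
  | c :: rest =>
    match pvTailAfterDot rest with
    | some t => some t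
    | none => if c = '.' then some rest else none

-- extension(without_vers(url)) with .lower()
def pvExtS (url : String) : String :=
  let base := pvWithoutVers url.toList
  String.ofList (PySem.Chars.lower ((pvTailAfterDot base).getD base))

-- the f-string tag for one (url, ext) pair ('ext in PRELOAD_AS' branch)
def pvTagPair (p : String × String) : String :=
  match PRELOAD_AS_.get? p.2 with
  | some a => "<" ++ p.1 ++ ">; rel=preload; crossorigin; as=" ++ a
  | none   => "<" ++ p.1 ++ ">; rel=preload; crossorigin"

def create_preload_header (urls : List String) : String :=
  let urls_with_ext := urls.map (fun url => (url, pvExtS url))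
  let sorted_urls := PySem.List.sorted urls_with_ext (fun p => PRELOAD_ORDER_.getD p.2 100)
  let preload_tags := sorted_urls.map pvTagPair
  PySem.Str.join ", " preload_tags

-- ===== PORT B =====
def PRELOAD_AS_B : PySem.Dict String String :=
  PySem.Dict.mk [("js","script"),("css","style"),("png","image"),("jpg","image"),("jpeg","image"),
                 ("webp","image"),("svg","image"),("gif","image"),("ttf","font"),("woff","font"),("woff2","font")]

-- base = url.partition('?')[0]; i = base.rfind('.'); ext = (base[i+1:] if i >= 0 else base).lower()
-- exact: base[base.rfind('.')+1:] is the reversed longest dot-free suffix of the reversed base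
def pvExtB (url : String) : String :=
  let base := (url.toList.span (fun c => c ≠ '?')).1
  let ext := if base.contains '.' then (base.reverse.takeWhile (fun c => c ≠ '.')).reverse else base
  String.ofList (PySem.Chars.lower ext)

-- the if/elif priority chain of Source B
def pvPriB (e : String) : Int :=
  if e = "css" then 0
  else if e = "ttf" ∨ e = "woff" ∨ e = "woff2" then 1
  else if e = "js" then 2
  else 100

-- tag = '<%s>; rel=preload; crossorigin' % url, then += '; as=' + kind if kind is not None
def pvTagB (url : String) (ext : String) : String :=
  let tag := "<" ++ url ++ ">; rel=preload; crossorigin"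
  match PRELOAD_AS_B.get? ext with
  | some kind => tag ++ ("; as=" ++ kind)
  | none => tag

def create_preload_header_alt (urls : List String) : String :=
  let pairs := urls.map (fun url =>
    let ext := pvExtB url
    (pvPriB ext, pvTagB url ext))
  let out := ([0, 1, 2, 100] : List Int).flatMap
    (fun want => (pairs.filter (fun q => q.1 == want)).map Prod.snd)
  PySem.Str.join ", " out

-- ===== PRECONDITION & SPEC =====
def Spec_create_preload_header (urls : List String) (out : String) : Prop := out = create_preload_header_alt urls
instance (urls : List String) (out : String) : Decidable (Spec_create_preload_header urls out) := by unfold Spec_create_preload_header; infer_instance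

-- ===== CLAIM (what is proved, stated in full; the proofs are below) =====
def Claim_equal_create_preload_header : Prop := ∀ (urls : List String), Dom_create_preload_header urls → Spec_create_preload_header urls (create_preload_header urls)

-- ===== LEMMAS AND PROOFS =====

-- B's extension equals A's extension
lemma takeWhile_append_of_mem_not {p : Char → Bool} {l : List Char} (m : List Char)
    (x : Char) (hx : x ∈ l) (hpx : p x = false) :
    (l ++ m).takeWhile p = l.takeWhile p := by
  induction l with
  | nil => cases hx
  | cons a t ih =>
    by_cases ha : p a = true
    · simp only [List.cons_append, List.takeWhile_cons, ha, if_true]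
      rcases List.mem_cons.mp hx with rfl | hxt
      · rw [hpx] at ha; cases ha
      · rw [ih hxt]
    · have ha' : p a = false := by simpa using ha
      simp only [List.cons_append, List.takeWhile_cons, ha']
      simp

lemma takeWhile_append_of_all {p : Char → Bool} {l : List Char} (m : List Char)
    (h : ∀ x ∈ l, p x = true) :
    (l ++ m).takeWhile p = l ++ m.takeWhile p := by
  induction l with
  | nil => simp
  | cons a t ih =>
    simp only [List.cons_append, List.takeWhile_cons, h a (by simp), if_true]
    rw [ih (fun x hx => h x (by simp [hx]))]

lemma tailAfterDot_char (cs : List Char) :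
    pvTailAfterDot cs =
      if '.' ∈ cs then some ((cs.reverse.takeWhile (fun c => c ≠ '.')).reverse) else none := by
  induction cs with
  | nil => simp [pvTailAfterDot]
  | cons c rest ih =>
    by_cases hr : '.' ∈ rest
    · have heq : (rest.reverse ++ [c]).takeWhile (fun c => decide (c ≠ '.'))
          = rest.reverse.takeWhile (fun c => decide (c ≠ '.')) :=
        takeWhile_append_of_mem_not [c] '.' (by simp [hr]) (by simp)
      rw [show pvTailAfterDot (c :: rest) = (match pvTailAfterDot rest with
            | some t => some t
            | none => if c = '.' then some rest else none) from rfl,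
          ih, if_pos hr, if_pos (show '.' ∈ c :: rest by simp [hr]),
          List.reverse_cons, heq]
    · by_cases hc : c = '.'
      · have hall : ∀ x ∈ rest.reverse, (fun c => decide (c ≠ '.')) x = true := by
          intro x hx
          simp only [decide_eq_true_eq, ne_eq]
          intro h
          subst h
          exact hr (List.mem_reverse.mp hx)
        have heq : (rest.reverse ++ [c]).takeWhile (fun c => decide (c ≠ '.'))
            = rest.reverse ++ ([c].takeWhile (fun c => decide (c ≠ '.'))) :=
          takeWhile_append_of_all [c] hall
        subst hc
        rw [show pvTailAfterDot ('.' :: rest) = (match pvTailAfterDot rest with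
              | some t => some t
              | none => if ('.' : Char) = '.' then some rest else none) from rfl,
            ih, if_neg hr, if_pos rfl, if_pos (show '.' ∈ '.' :: rest by simp),
            List.reverse_cons, heq]
        simp [List.takeWhile]
      · rw [show pvTailAfterDot (c :: rest) = (match pvTailAfterDot rest with
              | some t => some t
              | none => if c = '.' then some rest else none) from rfl,
            ih, if_neg hr, if_neg hc,
            if_neg (show ¬ '.' ∈ c :: rest by
              simp only [List.mem_cons]
              rintro (h | h)
              · exact hc h.symm
              · exact hr h)]

lemma pvExtB_eq (url : String) : pvExtB url = pvExtS url := by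
  show String.ofList (PySem.Chars.lower _) = String.ofList (PySem.Chars.lower _)
  rw [List.span_eq_takeWhile_dropWhile]
  show String.ofList (PySem.Chars.lower
        (if (url.toList.takeWhile (fun c => c ≠ '?')).contains '.' = true
         then ((url.toList.takeWhile (fun c => c ≠ '?')).reverse.takeWhile (fun c => c ≠ '.')).reverse
         else url.toList.takeWhile (fun c => c ≠ '?')))
      = String.ofList (PySem.Chars.lower
        ((pvTailAfterDot (url.toList.takeWhile (fun c => c ≠ '?'))).getD
          (url.toList.takeWhile (fun c => c ≠ '?'))))
  generalize url.toList.takeWhile (fun c => c ≠ '?') = base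
  rw [tailAfterDot_char]
  by_cases h : '.' ∈ base
  · rw [if_pos h, Option.getD_some, if_pos (by simpa using h)]
  · rw [if_neg h, Option.getD_none, if_neg (by simpa using h)]

-- B's priority chain equals A's dict lookup with default 100
lemma pvPriB_eq (e : String) : pvPriB e = PRELOAD_ORDER_.getD e 100 := by
  by_cases h1 : e = "css"; · subst h1; decide
  by_cases h2 : e = "ttf"; · subst h2; decide
  by_cases h3 : e = "woff"; · subst h3; decide
  by_cases h4 : e = "woff2"; · subst h4; decide
  by_cases h5 : e = "js"; · subst h5; decide
  have c1 : ¬ "css" = e := fun h => h1 h.symm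
  have c2 : ¬ "ttf" = e := fun h => h2 h.symm
  have c3 : ¬ "woff" = e := fun h => h3 h.symm
  have c4 : ¬ "woff2" = e := fun h => h4 h.symm
  have c5 : ¬ "js" = e := fun h => h5 h.symm
  simp [pvPriB, PRELOAD_ORDER_, PySem.Dict.getD_eq_get?_getD,
        PySem.Dict.get?, h1, h2, h3, h4, h5, c1, c2, c3, c4, c5]

-- B's tag equals A's tag text
lemma pvTagB_eq (url : String) : pvTagB url (pvExtB url) = pvTagPair (url, pvExtS url) := by
  unfold pvTagB pvTagPair
  rw [pvExtB_eq]
  have hd : PRELOAD_AS_B = PRELOAD_AS_ := rfl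
  rw [hd]
  cases PRELOAD_AS_.get? (pvExtS url) with
  | none => rfl
  | some kind =>
    dsimp only
    simp only [String.append_assoc]
    rw [show (">; rel=preload; crossorigin" ++ ("; as=" ++ kind) : String)
          = ">; rel=preload; crossorigin; as=" ++ kind by
        rw [← String.append_assoc]
        rfl]

-- A-side: insertion sort with a 4-valued key fills four ordered buckets
lemma pvPr_cases (e : String) :
    PRELOAD_ORDER_.getD e 100 = 0 ∨ PRELOAD_ORDER_.getD e 100 = 1 ∨
    PRELOAD_ORDER_.getD e 100 = 2 ∨ PRELOAD_ORDER_.getD e 100 = 100 := by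
  simp only [PRELOAD_ORDER_, PySem.Dict.getD_eq_get?_getD, PySem.Dict.get?_mk_cons]
  split_ifs <;> simp [PySem.Dict.get?]

lemma insertBy_append_not_before {α : Type} (before : α → α → Bool) (x : α) (as bs : List α)
    (h : ∀ y ∈ as, before x y = false) :
    PySem.List.insertBy before x (as ++ bs) = as ++ PySem.List.insertBy before x bs := by
  induction as with
  | nil => simp
  | cons a t ih =>
    have ha : before x a = false := h a (by simp)
    simp [PySem.List.insertBy, ha, ih (fun y hy => h y (by simp [hy]))]

lemma insertBy_all_before {α : Type} (before : α → α → Bool) (x : α) (l : List α)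
    (h : ∀ y ∈ l, before x y = true) :
    PySem.List.insertBy before x l = x :: l := by
  cases l with
  | nil => simp [PySem.List.insertBy]
  | cons a t => simp [PySem.List.insertBy, h a (by simp)]

lemma foldl_insertBy_buckets {α : Type} (key : α → Int) (xs b0 b1 b2 b3 : List α)
    (hx : ∀ x ∈ xs, key x = 0 ∨ key x = 1 ∨ key x = 2 ∨ key x = 100)
    (h0 : ∀ y ∈ b0, key y = 0) (h1 : ∀ y ∈ b1, key y = 1)
    (h2 : ∀ y ∈ b2, key y = 2) (h3 : ∀ y ∈ b3, key y = 100) :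
    xs.foldl (fun acc x => PySem.List.insertBy (fun a b => decide (key a < key b)) x acc)
      (b0 ++ b1 ++ b2 ++ b3)
    = (b0 ++ xs.filter (fun x => decide (key x = 0))) ++ (b1 ++ xs.filter (fun x => decide (key x = 1)))
      ++ (b2 ++ xs.filter (fun x => decide (key x = 2))) ++ (b3 ++ xs.filter (fun x => decide (key x = 100))) := by
  induction xs generalizing b0 b1 b2 b3 with
  | nil => simp
  | cons x rest ih =>
    have hrest : ∀ y ∈ rest, key y = 0 ∨ key y = 1 ∨ key y = 2 ∨ key y = 100 :=
      fun y hy => hx y (by simp [hy])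
    rcases hx x (by simp) with hk | hk | hk | hk
    · have hfall : ∀ y ∈ b0, (fun a b => decide (key a < key b)) x y = false := by
        intro y hy; simp only [h0 y hy, hk]; decide
      have hall : ∀ y ∈ b1 ++ (b2 ++ b3), (fun a b => decide (key a < key b)) x y = true := by
        intro y hy
        simp only [List.mem_append] at hy
        rcases hy with hy | hy | hy
        · simp only [h1 y hy, hk]; decide
        · simp only [h2 y hy, hk]; decide
        · simp only [h3 y hy, hk]; decide
      have hins := insertBy_append_not_before (fun a b => decide (key a < key b)) x b0 (b1 ++ (b2 ++ b3)) hfall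
      rw [insertBy_all_before (fun a b => decide (key a < key b)) _ _ hall] at hins
      have hb0 : ∀ y ∈ b0 ++ [x], key y = 0 := by
        intro y hy
        rcases List.mem_append.mp hy with hy | hy
        · exact h0 y hy
        · simp only [List.mem_singleton] at hy; rw [hy]; exact hk
      simp only [List.foldl_cons]
      rw [show b0 ++ b1 ++ b2 ++ b3 = b0 ++ (b1 ++ (b2 ++ b3)) by simp, hins,
          show b0 ++ (x :: (b1 ++ (b2 ++ b3))) = (b0 ++ [x]) ++ b1 ++ b2 ++ b3 by simp,
          ih (b0 ++ [x]) b1 b2 b3 hrest hb0 h1 h2 h3]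
      simp [hk]
    · have hfall0 : ∀ y ∈ b0, (fun a b => decide (key a < key b)) x y = false := by
        intro y hy; simp only [h0 y hy, hk]; decide
      have hfall1 : ∀ y ∈ b1, (fun a b => decide (key a < key b)) x y = false := by
        intro y hy; simp only [h1 y hy, hk]; decide
      have hall : ∀ y ∈ b2 ++ b3, (fun a b => decide (key a < key b)) x y = true := by
        intro y hy
        rcases List.mem_append.mp hy with hy | hy
        · simp only [h2 y hy, hk]; decide
        · simp only [h3 y hy, hk]; decide
      have hins := insertBy_append_not_before (fun a b => decide (key a < key b)) x b0 (b1 ++ (b2 ++ b3)) hfall0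
      rw [insertBy_append_not_before (fun a b => decide (key a < key b)) x b1 (b2 ++ b3) hfall1,
          insertBy_all_before (fun a b => decide (key a < key b)) _ _ hall] at hins
      have hb1 : ∀ y ∈ b1 ++ [x], key y = 1 := by
        intro y hy
        rcases List.mem_append.mp hy with hy | hy
        · exact h1 y hy
        · simp only [List.mem_singleton] at hy; rw [hy]; exact hk
      simp only [List.foldl_cons]
      rw [show b0 ++ b1 ++ b2 ++ b3 = b0 ++ (b1 ++ (b2 ++ b3)) by simp, hins,
          show b0 ++ (b1 ++ (x :: (b2 ++ b3))) = b0 ++ (b1 ++ [x]) ++ b2 ++ b3 by simp,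
          ih b0 (b1 ++ [x]) b2 b3 hrest h0 hb1 h2 h3]
      simp [hk]
    · have hfall0 : ∀ y ∈ b0, (fun a b => decide (key a < key b)) x y = false := by
        intro y hy; simp only [h0 y hy, hk]; decide
      have hfall1 : ∀ y ∈ b1, (fun a b => decide (key a < key b)) x y = false := by
        intro y hy; simp only [h1 y hy, hk]; decide
      have hfall2 : ∀ y ∈ b2, (fun a b => decide (key a < key b)) x y = false := by
        intro y hy; simp only [h2 y hy, hk]; decide
      have hall : ∀ y ∈ b3, (fun a b => decide (key a < key b)) x y = true := by
        intro y hy; simp only [h3 y hy, hk]; decide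
      have hins := insertBy_append_not_before (fun a b => decide (key a < key b)) x b0 (b1 ++ (b2 ++ b3)) hfall0
      rw [insertBy_append_not_before (fun a b => decide (key a < key b)) x b1 (b2 ++ b3) hfall1,
          insertBy_append_not_before (fun a b => decide (key a < key b)) x b2 b3 hfall2,
          insertBy_all_before (fun a b => decide (key a < key b)) _ _ hall] at hins
      have hb2 : ∀ y ∈ b2 ++ [x], key y = 2 := by
        intro y hy
        rcases List.mem_append.mp hy with hy | hy
        · exact h2 y hy
        · simp only [List.mem_singleton] at hy; rw [hy]; exact hk
      simp only [List.foldl_cons]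
      rw [show b0 ++ b1 ++ b2 ++ b3 = b0 ++ (b1 ++ (b2 ++ b3)) by simp, hins,
          show b0 ++ (b1 ++ (b2 ++ x :: b3)) = b0 ++ b1 ++ (b2 ++ [x]) ++ b3 by simp,
          ih b0 b1 (b2 ++ [x]) b3 hrest h0 h1 hb2 h3]
      simp [hk]
    · have hfall : ∀ y ∈ b0 ++ b1 ++ b2 ++ b3, (fun a b => decide (key a < key b)) x y = false := by
        intro y hy
        simp only [List.mem_append] at hy
        rcases hy with ((hy | hy) | hy) | hy
        · simp only [h0 y hy, hk]; decide
        · simp only [h1 y hy, hk]; decide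
        · simp only [h2 y hy, hk]; decide
        · simp only [h3 y hy, hk]; decide
      have hins := PySem.List.insertBy_of_forall_not_before (fun a b => decide (key a < key b)) x (b0 ++ b1 ++ b2 ++ b3) hfall
      have hb3 : ∀ y ∈ b3 ++ [x], key y = 100 := by
        intro y hy
        rcases List.mem_append.mp hy with hy | hy
        · exact h3 y hy
        · simp only [List.mem_singleton] at hy; rw [hy]; exact hk
      simp only [List.foldl_cons]
      rw [hins, show b0 ++ b1 ++ b2 ++ b3 ++ [x] = b0 ++ b1 ++ b2 ++ (b3 ++ [x]) by simp,
          ih b0 b1 b2 (b3 ++ [x]) hrest h0 h1 h2 hb3]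
      simp [hk]

-- one bucket of B equals the corresponding filtered, tagged slice of A's sorted list
lemma bucket_eq (urls : List String) (k : Int) :
    ((urls.map (fun url => (pvPriB (pvExtB url), pvTagB url (pvExtB url)))).filter
        (fun q => q.1 == k)).map Prod.snd
    = ((urls.map (fun url => (url, pvExtS url))).filter
        (fun p => decide (PRELOAD_ORDER_.getD p.2 100 = k))).map pvTagPair := by
  induction urls with
  | nil => rfl
  | cons u rest ih =>
    simp only [List.map_cons, List.filter_cons]
    have hbeq : ∀ a b : Int, (a == b) = decide (a = b) := by
      intro a b; by_cases h : a = b <;> simp [h]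
    have hk : ((pvPriB (pvExtB u), pvTagB u (pvExtB u)).1 == k)
        = decide (PRELOAD_ORDER_.getD (u, pvExtS u).2 100 = k) := by
      simp [pvPriB_eq, pvExtB_eq, hbeq]
    rw [hk]
    by_cases h : PRELOAD_ORDER_.getD (pvExtS u) 100 = k
    · rw [if_pos (by simpa using h), if_pos (by simpa using h)]
      simp only [List.map_cons]
      rw [ih, pvTagB_eq]
    · rw [if_neg (by simpa using h), if_neg (by simpa using h)]
      exact ih

-- ===== VERDICT (by name: the statement is the Claim_ definition above) =====
theorem create_preload_header_spec : Claim_equal_create_preload_header := by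
  intro urls _
  unfold Spec_create_preload_header create_preload_header create_preload_header_alt
  simp only [PySem.List.sorted_eq_foldl_insertBy]
  rw [show ([] : List (String × String)) = [] ++ [] ++ [] ++ [] from rfl,
      foldl_insertBy_buckets (fun p => PRELOAD_ORDER_.getD p.2 100)
        (urls.map (fun url => (url, pvExtS url))) [] [] [] []
        (fun p _ => pvPr_cases p.2) (by simp) (by simp) (by simp) (by simp)]
  simp only [List.nil_append, List.map_append, List.flatMap_cons, List.flatMap_nil,
    List.append_nil, bucket_eq, List.append_assoc]
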